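-- pv_equiv track=rewrite | github.com/alikasif/agents | train_itenary/itenary_builder.py | _find_all_paths_bfs
-- ===== SOURCE A (Python) =====
-- from typing import Dict, List, Tuple, Optional, Set, Union
-- from collections import defaultdict, deque
--
-- def _find_all_paths_bfs(
--     graph: Dict[Tuple[str, str], List[Dict]],
--     start: str,
--     end: str,
--     max_hops: int
-- ) -> List[List[Tuple[str, str]]]:
--     """
--     Find all paths from start to end station using BFS with max_hops limit.
--
--     Returns:
--         List of paths, where each path is a list of (from_station, to_station) tuples
--     """
--     all_paths = []
--
--     # BFS queue: (current_station, path_so_far, visited_stations)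
--     queue = deque([(start, [], set([start]))])
--
--     while queue:
--         current, path, visited = queue.popleft()
--
--         # Check if we've exceeded max hops
--         if len(path) > max_hops:
--             continue
--
--         # Check all outgoing edges from current station
--         for (from_st, to_st), trains in graph.items():
--             if from_st == current and trains:
--                 new_path = path + [(from_st, to_st)]
--
--                 # Found destination
--                 if to_st == end:
--                     all_paths.append(new_path)
--                     continue
--
--                 # Continue exploring if not visited and under hop limit
--                 if to_st not in visited and len(new_path) < max_hops:
--                     new_visited = visited.copy()
--                     new_visited.add(to_st)
--                     queue.append((to_st, new_path, new_visited))
--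
--     return all_paths
-- ===== SOURCE B (Python) =====
-- def _find_all_paths_bfs(graph, start, end, max_hops):
--     # Level-synchronous recursion: index outgoing edges once, then expand whole
--     # generations of partial paths at a time -- no FIFO queue, no per-entry hop test.
--     adj = {}
--     for (from_st, to_st), trains in graph.items():
--         if trains:
--             adj.setdefault(from_st, []).append(to_st)
--     if max_hops < 0:
--         return []
--
--     def expand(frontier):
--         if not frontier:
--             return []
--         found = []
--         nxt = []
--         for cur, path, visited in frontier:
--             for to_st in adj.get(cur, ()):
--                 new_path = path + [(cur, to_st)]
--                 if to_st == end:
--                     found.append(new_path)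
--                 elif to_st not in visited and len(new_path) < max_hops:
--                     nxt.append((to_st, new_path, visited | {to_st}))
--         return found + expand(nxt)
--
--     return expand([(start, [], {start})])
-- ===== Notes on version B (the rewrite author's own statement) =====
-- stated objective: alternative
-- what changed: B builds a from-station adjacency index once and replaces A's FIFO queue (which rescans every graph edge per dequeued state) by a level-synchronous recursion that expands a whole generation of partial paths per call, returning negative hop budgets early; wall time on the measured inputs was not 1.5x better.
import Mathlib
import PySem

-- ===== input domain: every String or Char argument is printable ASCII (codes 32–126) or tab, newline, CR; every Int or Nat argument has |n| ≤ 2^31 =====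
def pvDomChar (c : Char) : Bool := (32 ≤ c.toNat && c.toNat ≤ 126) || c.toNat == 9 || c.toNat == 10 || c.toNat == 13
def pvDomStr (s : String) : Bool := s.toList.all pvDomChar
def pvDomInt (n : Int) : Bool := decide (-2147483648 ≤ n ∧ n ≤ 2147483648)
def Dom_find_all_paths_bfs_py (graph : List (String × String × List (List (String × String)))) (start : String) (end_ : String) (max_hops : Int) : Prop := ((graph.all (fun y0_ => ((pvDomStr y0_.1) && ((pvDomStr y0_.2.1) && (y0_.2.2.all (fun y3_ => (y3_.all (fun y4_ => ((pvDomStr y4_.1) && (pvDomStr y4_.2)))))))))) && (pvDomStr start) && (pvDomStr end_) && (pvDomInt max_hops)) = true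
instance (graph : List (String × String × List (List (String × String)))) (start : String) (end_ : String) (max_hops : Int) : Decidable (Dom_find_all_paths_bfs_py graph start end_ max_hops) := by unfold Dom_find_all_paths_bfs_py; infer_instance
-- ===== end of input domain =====

-- B replaces A's FIFO queue (which rescans every graph edge at each dequeue) by a
-- once-built from-station adjacency index and a level-synchronous recursion that
-- expands a whole generation of partial paths at a time; same results in the same order.

-- ===== PORT A =====
-- an edge, a partial path, a BFS state (current station, path so far, visited stations)
abbrev pvEdge := String × String × List (List (String × String))
abbrev pvPath := List (String × String)
abbrev pvState := String × pvPath × PySem.Set String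

-- the body of A's `for (from_st, to_st), trains in graph.items()` loop
def pvEdgeStep (end_ : String) (max_hops : Int) (cur : String) (path : pvPath) (vis : PySem.Set String) :
    (List pvPath × List pvState) → pvEdge → (List pvPath × List pvState) := fun st e =>
  if e.1 == cur && !e.2.2.isEmpty then
    let np := path ++ [(e.1, e.2.1)]
    if e.2.1 == end_ then (st.1 ++ [np], st.2)
    else if !(PySem.Set.contains vis e.2.1) && (np.length : Int) < max_hops then
      (st.1, st.2 ++ [(e.2.1, np, PySem.Set.add vis e.2.1)])
    else st
  else st

-- ---- termination machinery for both loops: each enqueued child visits a fresh station,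
-- ---- so the potential Σ (E+1)^(#unvisited stations) strictly drops at every step ----
def pvWg (E : Nat) (S : Finset String) (vis : PySem.Set String) : Nat :=
  (E + 1) ^ ((S \ vis.toFinset).card)
def pvMug (E : Nat) (S : Finset String) (q : List pvState) : Nat :=
  (q.map (fun e => pvWg E S e.2.2)).sum

-- a fold over a pair whose step only appends to both components shifts over the start value
theorem pvFoldlPairShift {α β γ : Type} (s : (List α × List β) → γ → (List α × List β))
    (hs : ∀ (a : List α) (b : List β) (e : γ), s (a, b) e = (a ++ (s ([], []) e).1, b ++ (s ([], []) e).2)) :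
    ∀ (l : List γ) (a : List α) (b : List β),
      l.foldl s (a, b) = (a ++ (l.foldl s ([], [])).1, b ++ (l.foldl s ([], [])).2) := by
  intro l
  induction l with
  | nil => intro a b; simp
  | cons e l ih =>
    intro a b
    simp only [List.foldl_cons, hs a b e]
    rw [ih]
    conv_rhs => rw [show s ([], []) e = ((s ([], []) e).1, (s ([], []) e).2) from rfl, ih]
    simp [List.append_assoc]

-- every child produced by A's edge scan extends the path to a fresh to-station of the graph
theorem pvEdgeStep_children (end_ : String) (max_hops : Int) (cur : String) (path : pvPath) (vis : PySem.Set String) :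
    ∀ (g : List pvEdge) (a : List pvPath) (b : List pvState),
      ∀ c ∈ (g.foldl (pvEdgeStep end_ max_hops cur path vis) (a, b)).2,
        c ∈ b ∨ ∃ t, PySem.Set.contains vis t = false ∧ t ∈ g.map (fun x => x.2.1) ∧
          ((path.length + 1 : Int) < max_hops) ∧ c = (t, path ++ [(cur, t)], PySem.Set.add vis t) := by
  intro g
  induction g with
  | nil => intro a b c hc; exact Or.inl hc
  | cons e g ih =>
    intro a b c hc
    simp only [List.foldl_cons] at hc
    rcases he : pvEdgeStep end_ max_hops cur path vis (a, b) e with ⟨a', b'⟩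
    rw [he] at hc
    have hb' : c ∈ b' → c ∈ b ∨ ∃ t, PySem.Set.contains vis t = false ∧ t ∈ (e :: g).map (fun x => x.2.1) ∧
        ((path.length + 1 : Int) < max_hops) ∧ c = (t, path ++ [(cur, t)], PySem.Set.add vis t) := by
      intro hcb
      simp only [pvEdgeStep] at he
      split_ifs at he with h1 h2 h3
      · rw [Prod.mk.injEq] at he; rw [← he.2] at hcb; exact Or.inl hcb
      · rw [Prod.mk.injEq] at he; rw [← he.2] at hcb
        rcases List.mem_append.mp hcb with h | h
        · exact Or.inl h
        · right
          simp only [List.mem_singleton] at h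
          simp only [Bool.and_eq_true, Bool.not_eq_true'] at h3 h1
          have hcur : e.1 = cur := by simpa using h1.1
          refine ⟨e.2.1, h3.1, by simp, ?_, by rw [h, hcur]⟩
          · have := h3.2
            simpa [hcur] using this
      · rw [Prod.mk.injEq] at he; rw [← he.2] at hcb; exact Or.inl hcb
      · rw [Prod.mk.injEq] at he; rw [← he.2] at hcb; exact Or.inl hcb
    rcases ih a' b' c hc with h | ⟨t, h1, h2, h3, h4⟩
    · exact hb' h
    · exact Or.inr ⟨t, h1, by simp only [List.map_cons, List.mem_cons]; exact Or.inr h2, h3, h4⟩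

theorem pvEdgeStep_len (end_ : String) (max_hops : Int) (cur : String) (path : pvPath) (vis : PySem.Set String) :
    ∀ (g : List pvEdge) (a : List pvPath) (b : List pvState),
      (g.foldl (pvEdgeStep end_ max_hops cur path vis) (a, b)).2.length ≤ b.length + g.length := by
  intro g
  induction g with
  | nil => intro a b; simp
  | cons e g ih =>
    intro a b
    simp only [List.foldl_cons, List.length_cons]
    rcases he : pvEdgeStep end_ max_hops cur path vis (a, b) e with ⟨a', b'⟩
    have hlen : b'.length ≤ b.length + 1 := by
      simp only [pvEdgeStep] at he
      split_ifs at he <;> rw [Prod.mk.injEq] at he <;> rw [← he.2] <;> simp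
    have := ih a' b'
    omega

-- generic: children over fresh stations weigh strictly less than their parent
theorem pvMug_lt (E : Nat) (S : Finset String) (vis : PySem.Set String) (ch : List pvState)
    (hlen : ch.length ≤ E)
    (hch : ∀ c ∈ ch, ∃ t, t ∈ S ∧ t ∉ vis ∧ c.2.2 = PySem.Set.add vis t) :
    pvMug E S ch < pvWg E S vis := by
  have hpos : 0 < (E + 1) ^ ((S \ vis.toFinset).card) := Nat.pow_pos (by omega)
  rcases ch with _ | ⟨c0, ch'⟩
  · simp only [pvMug, List.map_nil, List.sum_nil, pvWg]; exact hpos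
  · set g := (S \ vis.toFinset).card with hg
    obtain ⟨t0, ht0S, ht0v, _⟩ := hch c0 (List.mem_cons_self ..)
    have ht0 : t0 ∈ S \ vis.toFinset := Finset.mem_sdiff.mpr ⟨ht0S, by simpa using ht0v⟩
    have hg1 : 1 ≤ g := Finset.card_pos.mpr ⟨t0, ht0⟩
    have hw : ∀ c ∈ c0 :: ch', pvWg E S c.2.2 = (E + 1) ^ (g - 1) := by
      intro c hc
      obtain ⟨t, htS, htv, hcv⟩ := hch c hc
      have htv' : t ∉ vis.toFinset := by simpa using htv
      have : (PySem.Set.add vis t).toFinset = insert t vis.toFinset := by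
        rw [PySem.Set.add_of_not_mem htv]
        simp [List.toFinset_append]
      rw [pvWg, hcv, this, Finset.sdiff_insert]
      rw [Finset.card_erase_of_mem (Finset.mem_sdiff.mpr ⟨htS, htv'⟩)]
    have hsum : pvMug E S (c0 :: ch') ≤ (c0 :: ch').length * (E + 1) ^ (g - 1) := by
      rw [pvMug, ← List.length_map (f := fun e => pvWg E S e.2.2) (as := c0 :: ch')]
      apply List.sum_le_card_nsmul
      intro x hx
      obtain ⟨c, hc, rfl⟩ := List.mem_map.mp hx
      exact le_of_eq (hw c hc)
    have hp : 0 < (E + 1) ^ (g - 1) := Nat.pow_pos (by omega)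
    have hEg : (E + 1) ^ g = (E + 1) ^ (g - 1) * (E + 1) := by
      rw [← pow_succ]
      congr 1
      omega
    calc pvMug E S (c0 :: ch') ≤ (c0 :: ch').length * (E + 1) ^ (g - 1) := hsum
      _ ≤ E * (E + 1) ^ (g - 1) := Nat.mul_le_mul_right _ hlen
      _ < (E + 1) ^ (g - 1) * (E + 1) := by nlinarith
      _ = pvWg E S vis := by rw [pvWg, ← hg, hEg]

-- the decrease cited by pvLoopA's decreasing_by, skip case is handled inline
theorem pvMuA_step_lt (graph : List pvEdge) (end_ : String) (max_hops : Int)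
    (cur : String) (path : pvPath) (vis : PySem.Set String) (acc : List pvPath) :
    pvMug graph.length ((graph.map (fun x => x.2.1)).toFinset)
        ((graph.foldl (pvEdgeStep end_ max_hops cur path vis) (acc, [])).2) <
      pvWg graph.length ((graph.map (fun x => x.2.1)).toFinset) vis := by
  apply pvMug_lt
  · have := pvEdgeStep_len end_ max_hops cur path vis graph acc []
    simpa using this
  · intro c hc
    rcases pvEdgeStep_children end_ max_hops cur path vis graph acc [] c hc with h | ⟨t, h1, h2, _, h4⟩
    · simp at h
    · refine ⟨t, List.mem_toFinset.mpr h2, ?_, by rw [h4]⟩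
      intro hmem
      rw [(PySem.Set.contains_iff vis t).mpr hmem] at h1
      exact Bool.true_eq_false.mp h1

-- A's `while queue:` loop (FIFO deque; each dequeue rescans every edge of graph)
def pvLoopA (graph : List pvEdge) (end_ : String) (max_hops : Int) :
    List pvState → List pvPath → List pvPath
  | [], acc => acc
  | (cur, path, vis) :: q, acc =>
    if (path.length : Int) > max_hops then pvLoopA graph end_ max_hops q acc
    else
      let r := graph.foldl (pvEdgeStep end_ max_hops cur path vis) (acc, [])
      pvLoopA graph end_ max_hops (q ++ r.2) r.1
termination_by q _ => pvMug graph.length ((graph.map (fun x => x.2.1)).toFinset) q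
decreasing_by
  · simp only [pvMug, List.map_cons, List.sum_cons]
    have := Nat.pow_pos (n := (((graph.map (fun x => x.2.1)).toFinset \ vis.toFinset).card)) (show 0 < graph.length + 1 by omega)
    simp only [pvWg] at *
    omega
  · simp only [pvMug, List.map_append, List.sum_append, List.map_cons, List.sum_cons, List.foldl_attach]
    have h := pvMuA_step_lt graph end_ max_hops cur path vis acc
    simp only [pvMug, pvWg] at h ⊢
    omega

def find_all_paths_bfs_py (graph : List (String × String × List (List (String × String)))) (start : String) (end_ : String) (max_hops : Int) : List (List (String × String)) :=
  pvLoopA graph end_ max_hops [(start, [], PySem.Set.ofList [start])] []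

-- ===== PORT B =====
-- adj.setdefault(from_st, []).append(to_st), only for edges with trains
def pvAdjB (graph : List pvEdge) : PySem.Dict String (List String) :=
  graph.foldl (fun d e => if !e.2.2.isEmpty then d.modify e.1 [] (fun l => l ++ [e.2.1]) else d)
    PySem.Dict.empty

-- the body of B's `for to_st in adj.get(cur, ())` loop
def pvNbrStep (end_ : String) (max_hops : Int) (cur : String) (path : pvPath) (vis : PySem.Set String) :
    (List pvPath × List pvState) → String → (List pvPath × List pvState) := fun st t =>
  let np := path ++ [(cur, t)]
  if t == end_ then (st.1 ++ [np], st.2)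
  else if !(PySem.Set.contains vis t) && (np.length : Int) < max_hops then
    (st.1, st.2 ++ [(t, np, PySem.Set.union vis (PySem.Set.ofList [t]))])
  else st

theorem pvNbrStep_shift (end_ : String) (max_hops : Int) (cur : String) (path : pvPath) (vis : PySem.Set String) :
    ∀ (a : List pvPath) (b : List pvState) (t : String),
      pvNbrStep end_ max_hops cur path vis (a, b) t =
        (a ++ (pvNbrStep end_ max_hops cur path vis ([], []) t).1,
         b ++ (pvNbrStep end_ max_hops cur path vis ([], []) t).2) := by
  intro a b t
  simp only [pvNbrStep]
  split_ifs <;> simp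

-- B's per-state expansion (inner loop over the adjacency list), from an empty start
def pvStepB (adj : PySem.Dict String (List String)) (end_ : String) (max_hops : Int) (e : pvState) :
    List pvPath × List pvState :=
  (adj.getD e.1 []).foldl (pvNbrStep end_ max_hops e.1 e.2.1 e.2.2) ([], [])

-- B's `for cur, path, visited in frontier` loop collects found/next generation in order
theorem pvFrontFold (adj : PySem.Dict String (List String)) (end_ : String) (max_hops : Int)
    (f : List pvState) :
    f.foldl (fun st e => (adj.getD e.1 []).foldl (pvNbrStep end_ max_hops e.1 e.2.1 e.2.2) st) ([], []) =
      (f.flatMap (fun e => (pvStepB adj end_ max_hops e).1),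
       f.flatMap (fun e => (pvStepB adj end_ max_hops e).2)) := by
  have hs : ∀ (a : List pvPath) (b : List pvState) (e : pvState),
      (adj.getD e.1 []).foldl (pvNbrStep end_ max_hops e.1 e.2.1 e.2.2) (a, b) =
        (a ++ (pvStepB adj end_ max_hops e).1, b ++ (pvStepB adj end_ max_hops e).2) := by
    intro a b e
    exact pvFoldlPairShift _ (pvNbrStep_shift end_ max_hops e.1 e.2.1 e.2.2) _ a b
  induction f with
  | nil => simp
  | cons e f ih =>
    simp only [List.foldl_cons, List.flatMap_cons]
    rw [hs [] [] e]
    simp only [List.nil_append]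
    rw [pvFoldlPairShift _ (fun a b x => by rw [hs a b x, hs [] [] x]; simp) f
      (pvStepB adj end_ max_hops e).1 (pvStepB adj end_ max_hops e).2, ih]

theorem pvNbrStep_children (end_ : String) (max_hops : Int) (cur : String) (path : pvPath) (vis : PySem.Set String) :
    ∀ (ts : List String) (a : List pvPath) (b : List pvState),
      ∀ c ∈ (ts.foldl (pvNbrStep end_ max_hops cur path vis) (a, b)).2,
        c ∈ b ∨ ∃ t, PySem.Set.contains vis t = false ∧ t ∈ ts ∧
          ((path.length + 1 : Int) < max_hops) ∧ c = (t, path ++ [(cur, t)], PySem.Set.add vis t) := by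
  intro ts
  induction ts with
  | nil => intro a b c hc; exact Or.inl hc
  | cons t0 ts ih =>
    intro a b c hc
    simp only [List.foldl_cons] at hc
    rcases he : pvNbrStep end_ max_hops cur path vis (a, b) t0 with ⟨a', b'⟩
    rw [he] at hc
    have hb' : c ∈ b' → c ∈ b ∨ ∃ t, PySem.Set.contains vis t = false ∧ t ∈ t0 :: ts ∧
        ((path.length + 1 : Int) < max_hops) ∧ c = (t, path ++ [(cur, t)], PySem.Set.add vis t) := by
      intro hcb
      simp only [pvNbrStep] at he
      split_ifs at he with h1 h2
      · rw [Prod.mk.injEq] at he; rw [← he.2] at hcb; exact Or.inl hcb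
      · rw [Prod.mk.injEq] at he; rw [← he.2] at hcb
        rcases List.mem_append.mp hcb with h | h
        · exact Or.inl h
        · right
          simp only [List.mem_singleton] at h
          simp only [Bool.and_eq_true, Bool.not_eq_true'] at h2
          refine ⟨t0, h2.1, List.mem_cons_self .., by simpa using h2.2, by rw [h]; rfl⟩
      · rw [Prod.mk.injEq] at he; rw [← he.2] at hcb; exact Or.inl hcb
    rcases ih a' b' c hc with h | ⟨t, h1, h2, h3, h4⟩
    · exact hb' h
    · exact Or.inr ⟨t, h1, List.mem_cons_of_mem _ h2, h3, h4⟩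

theorem pvNbrStep_len (end_ : String) (max_hops : Int) (cur : String) (path : pvPath) (vis : PySem.Set String) :
    ∀ (ts : List String) (a : List pvPath) (b : List pvState),
      (ts.foldl (pvNbrStep end_ max_hops cur path vis) (a, b)).2.length ≤ b.length + ts.length := by
  intro ts
  induction ts with
  | nil => intro a b; simp
  | cons t0 ts ih =>
    intro a b
    simp only [List.foldl_cons, List.length_cons]
    rcases he : pvNbrStep end_ max_hops cur path vis (a, b) t0 with ⟨a', b'⟩
    have hlen : b'.length ≤ b.length + 1 := by
      simp only [pvNbrStep] at he
      split_ifs at he <;> rw [Prod.mk.injEq] at he <;> rw [← he.2] <;> simp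
    have := ih a' b'
    omega

-- a value looked up in adj is one of its stored lists
theorem pvAdj_getD_mem (adj : PySem.Dict String (List String)) (k t : String)
    (h : t ∈ adj.getD k []) : t ∈ adj.values.flatMap id := by
  cases hq : adj.get? k with
  | none =>
    rw [PySem.Dict.getD_eq_get?_getD, hq] at h
    simp at h
  | some v =>
    rw [PySem.Dict.getD_eq_get?_getD, hq] at h
    have hv : v ∈ adj.values := by
      have := PySem.Dict.mem_items_of_get?_eq_some adj hq
      exact List.mem_map.mpr ⟨(k, v), this, rfl⟩
    exact List.mem_flatMap.mpr ⟨v, hv, h⟩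

theorem pvAdj_getD_len (adj : PySem.Dict String (List String)) (k : String) :
    (adj.getD k []).length ≤ (adj.values.flatMap id).length := by
  have hmem : ∀ (L : List (List String)) (v : List String), v ∈ L → v.length ≤ (L.flatMap id).length := by
    intro L
    induction L with
    | nil => intro v hv; simp at hv
    | cons w L ih =>
      intro v hv
      simp only [List.flatMap_cons, List.length_append, id]
      rcases List.mem_cons.mp hv with rfl | hv
      · omega
      · have := ih v hv; omega
  cases hq : adj.get? k with
  | none => rw [PySem.Dict.getD_eq_get?_getD, hq]; simp
  | some v =>
    rw [PySem.Dict.getD_eq_get?_getD, hq]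
    have hv : v ∈ adj.values := by
      have := PySem.Dict.mem_items_of_get?_eq_some adj hq
      exact List.mem_map.mpr ⟨(k, v), this, rfl⟩
    exact hmem _ v hv

-- per-state decrease for B
theorem pvMuB_step_lt (adj : PySem.Dict String (List String)) (end_ : String) (max_hops : Int) (e : pvState) :
    pvMug (adj.values.flatMap id).length ((adj.values.flatMap id).toFinset)
        ((pvStepB adj end_ max_hops e).2) <
      pvWg (adj.values.flatMap id).length ((adj.values.flatMap id).toFinset) e.2.2 := by
  apply pvMug_lt
  · have h1 := pvNbrStep_len end_ max_hops e.1 e.2.1 e.2.2 (adj.getD e.1 []) [] []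
    have h2 := pvAdj_getD_len adj e.1
    simp only [pvStepB]
    simp only [List.length_nil] at h1
    omega
  · intro c hc
    rcases pvNbrStep_children end_ max_hops e.1 e.2.1 e.2.2 (adj.getD e.1 []) [] [] c hc with h | ⟨t, h1, h2, _, h4⟩
    · simp at h
    · refine ⟨t, List.mem_toFinset.mpr (pvAdj_getD_mem adj e.1 t h2), ?_, by rw [h4]⟩
      intro hmem
      rw [(PySem.Set.contains_iff e.2.2 t).mpr hmem] at h1
      exact Bool.true_eq_false.mp h1

theorem pvMug_flatMap_le (E : Nat) (S : Finset String) (ch : pvState → List pvState) (f : List pvState)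
    (h : ∀ e ∈ f, pvMug E S (ch e) < pvWg E S e.2.2) :
    pvMug E S (f.flatMap ch) ≤ pvMug E S f := by
  induction f with
  | nil => simp [pvMug]
  | cons e f ih =>
    simp only [List.flatMap_cons, pvMug, List.map_append, List.sum_append, List.map_cons, List.sum_cons]
    have h1 := h e (List.mem_cons_self ..)
    have h2 := ih (fun x hx => h x (List.mem_cons_of_mem _ hx))
    simp only [pvMug] at h1 h2
    omega

theorem pvMug_flatMap_lt (E : Nat) (S : Finset String) (ch : pvState → List pvState) (f : List pvState)
    (hf : f ≠ []) (h : ∀ e ∈ f, pvMug E S (ch e) < pvWg E S e.2.2) :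
    pvMug E S (f.flatMap ch) < pvMug E S f := by
  rcases f with _ | ⟨e, f⟩
  · exact absurd rfl hf
  · simp only [List.flatMap_cons, pvMug, List.map_append, List.sum_append, List.map_cons, List.sum_cons]
    have h1 := h e (List.mem_cons_self ..)
    have h2 := pvMug_flatMap_le E S ch f (fun x hx => h x (List.mem_cons_of_mem _ hx))
    simp only [pvMug] at h1 h2
    omega

-- B's recursive `expand(frontier)`: one generation of partial paths per call
def pvExpandB (adj : PySem.Dict String (List String)) (end_ : String) (max_hops : Int) :
    List pvState → List pvPath
  | [] => []
  | x :: f =>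
    let r := (x :: f).foldl
      (fun st e => (adj.getD e.1 []).foldl (pvNbrStep end_ max_hops e.1 e.2.1 e.2.2) st) ([], [])
    r.1 ++ pvExpandB adj end_ max_hops r.2
termination_by f => pvMug (adj.values.flatMap id).length ((adj.values.flatMap id).toFinset) f
decreasing_by
  rw [pvFrontFold]
  exact pvMug_flatMap_lt _ _ _ _ (List.cons_ne_nil x f)
    (fun e _ => pvMuB_step_lt adj end_ max_hops e)

def find_all_paths_bfs_py_alt (graph : List (String × String × List (List (String × String)))) (start : String) (end_ : String) (max_hops : Int) : List (List (String × String)) :=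
  let adj := pvAdjB graph
  if max_hops < 0 then []
  else pvExpandB adj end_ max_hops [(start, [], PySem.Set.ofList [start])]

-- ===== PRECONDITION & SPEC =====
def Spec_find_all_paths_bfs_py (graph : List (String × String × List (List (String × String)))) (start : String) (end_ : String) (max_hops : Int) (out : List (List (String × String))) : Prop := out = find_all_paths_bfs_py_alt graph start end_ max_hops
instance (graph : List (String × String × List (List (String × String)))) (start : String) (end_ : String) (max_hops : Int) (out : List (List (String × String))) : Decidable (Spec_find_all_paths_bfs_py graph start end_ max_hops out) := by unfold Spec_find_all_paths_bfs_py; infer_instance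

-- ===== CLAIM (what is proved, stated in full; the proofs are below) =====
def Claim_equal_find_all_paths_bfs_py : Prop := ∀ (graph : List (String × String × List (List (String × String)))) (start : String) (end_ : String) (max_hops : Int), Dom_find_all_paths_bfs_py graph start end_ max_hops → Spec_find_all_paths_bfs_py graph start end_ max_hops (find_all_paths_bfs_py graph start end_ max_hops)

-- ===== LEMMAS AND PROOFS =====

theorem pvEdgeStep_shift (end_ : String) (max_hops : Int) (cur : String) (path : pvPath) (vis : PySem.Set String) :
    ∀ (a : List pvPath) (b : List pvState) (e : pvEdge),
      pvEdgeStep end_ max_hops cur path vis (a, b) e =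
        (a ++ (pvEdgeStep end_ max_hops cur path vis ([], []) e).1,
         b ++ (pvEdgeStep end_ max_hops cur path vis ([], []) e).2) := by
  intro a b e
  simp only [pvEdgeStep]
  split_ifs <;> simp


-- A's edge scan for one state, from an empty start (proof-side view of A's inner fold)
def pvStepA (graph : List pvEdge) (end_ : String) (max_hops : Int) (e : pvState) :
    List pvPath × List pvState :=
  graph.foldl (pvEdgeStep end_ max_hops e.1 e.2.1 e.2.2) ([], [])

-- B's adjacency lookup is exactly the to-stations of A's matching edges, in graph order
theorem pvAdjB_getD (graph : List pvEdge) (cur : String) :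
    (pvAdjB graph).getD cur [] =
      (graph.filter (fun e => e.1 == cur && !e.2.2.isEmpty)).map (fun e => e.2.1) := by
  unfold pvAdjB
  have h1 : graph.foldl
      (fun d e => if !e.2.2.isEmpty then d.modify e.1 [] (fun l => l ++ [e.2.1]) else d)
      PySem.Dict.empty
      = ((graph.filter (fun e => !e.2.2.isEmpty)).map (fun e => (e.1, e.2.1))).foldl
          (fun d p => d.modify p.1 [] (fun l => l ++ [p.2])) PySem.Dict.empty := by
    rw [List.foldl_map, List.foldl_filter]
  rw [h1, PySem.Dict.getD_foldl_modify_append]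
  simp [List.filter_map, List.filter_filter, Function.comp]

-- one state's expansion is identical on both sides
theorem pvStep_eq (graph : List pvEdge) (end_ : String) (max_hops : Int) (e : pvState) :
    pvStepA graph end_ max_hops e = pvStepB (pvAdjB graph) end_ max_hops e := by
  unfold pvStepA pvStepB
  rw [pvAdjB_getD, List.foldl_map, List.foldl_filter]
  apply PySem.List.foldl_congr_mem
  intro st x _
  by_cases hc : (x.1 == e.1 && !x.2.2.isEmpty) = true
  · have hcur : x.1 = e.1 := by
      simp only [Bool.and_eq_true, beq_iff_eq] at hc
      exact hc.1
    simp only [pvEdgeStep, pvNbrStep, hcur]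
    rfl
  · simp [pvEdgeStep, hc]

-- processing a prefix of the queue appends its finds and enqueues its children
theorem pvDecomp (graph : List pvEdge) (end_ : String) (max_hops : Int) :
    ∀ (q1 : List pvState), (∀ e ∈ q1, ¬((e.2.1.length : Int) > max_hops)) →
      ∀ (q2 : List pvState) (acc : List pvPath),
        pvLoopA graph end_ max_hops (q1 ++ q2) acc =
          pvLoopA graph end_ max_hops (q2 ++ q1.flatMap (fun e => (pvStepA graph end_ max_hops e).2))
            (acc ++ q1.flatMap (fun e => (pvStepA graph end_ max_hops e).1)) := by
  intro q1
  induction q1 with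
  | nil => intro _ q2 acc; simp
  | cons x q1 ih =>
    intro hinv q2 acc
    obtain ⟨cur, path, vis⟩ := x
    have hskip : ¬((path.length : Int) > max_hops) := by
      have := hinv (cur, path, vis) (List.mem_cons_self ..)
      simpa using this
    rw [List.cons_append, pvLoopA, if_neg hskip]
    rw [pvFoldlPairShift _ (pvEdgeStep_shift end_ max_hops cur path vis) graph acc []]
    simp only [List.nil_append]
    have hstep : graph.foldl (pvEdgeStep end_ max_hops cur path vis) ([], []) =
        pvStepA graph end_ max_hops (cur, path, vis) := rfl
    rw [hstep]
    rw [show (q1 ++ q2) ++ (pvStepA graph end_ max_hops (cur, path, vis)).2 =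
          q1 ++ (q2 ++ (pvStepA graph end_ max_hops (cur, path, vis)).2) from by
      rw [List.append_assoc]]
    rw [ih (fun e he => hinv e (List.mem_cons_of_mem _ he))
      (q2 ++ (pvStepA graph end_ max_hops (cur, path, vis)).2)
      (acc ++ (pvStepA graph end_ max_hops (cur, path, vis)).1)]
    simp only [List.flatMap_cons, List.append_assoc]

-- the two programs agree on every frontier all of whose states are within the hop budget
theorem pvMain (graph : List pvEdge) (end_ : String) (max_hops : Int) :
    ∀ (n : Nat) (f : List pvState) (acc : List pvPath),
      pvMug graph.length ((graph.map (fun x => x.2.1)).toFinset) f ≤ n →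
      (∀ e ∈ f, ¬((e.2.1.length : Int) > max_hops)) →
      pvLoopA graph end_ max_hops f acc = acc ++ pvExpandB (pvAdjB graph) end_ max_hops f := by
  intro n
  induction n using Nat.strong_induction_on with
  | _ n ih =>
    intro f acc hmu hinv
    rcases f with _ | ⟨x, f'⟩
    · rw [pvLoopA, pvExpandB, List.append_nil]
    · -- A does one whole generation
      have hd := pvDecomp graph end_ max_hops (x :: f') hinv [] acc
      rw [List.append_nil, List.nil_append] at hd
      -- the next generation stays within the hop budget
      have hinv' : ∀ e ∈ (x :: f').flatMap (fun e => (pvStepA graph end_ max_hops e).2),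
          ¬((e.2.1.length : Int) > max_hops) := by
        intro c hc
        obtain ⟨e, _, hce⟩ := List.mem_flatMap.mp hc
        rcases pvEdgeStep_children end_ max_hops e.1 e.2.1 e.2.2 graph [] [] c hce with h | ⟨t, _, _, h3, h4⟩
        · simp at h
        · rw [h4]
          simp only [List.length_append, List.length_singleton]
          push_cast
          omega
      -- its measure strictly drops
      have hlt : pvMug graph.length ((graph.map (fun x => x.2.1)).toFinset)
          ((x :: f').flatMap (fun e => (pvStepA graph end_ max_hops e).2)) <
          pvMug graph.length ((graph.map (fun x => x.2.1)).toFinset) (x :: f') := by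
        apply pvMug_flatMap_lt _ _ _ _ (List.cons_ne_nil x f')
        intro e _
        exact pvMuA_step_lt graph end_ max_hops e.1 e.2.1 e.2.2 []
      have hrec := ih _ (lt_of_lt_of_le hlt hmu) _
        (acc ++ (x :: f').flatMap (fun e => (pvStepA graph end_ max_hops e).1)) le_rfl hinv'
      rw [hd, hrec]
      -- B expands the same generation
      rw [pvExpandB]
      rw [pvFrontFold (pvAdjB graph) end_ max_hops (x :: f')]
      simp only [← pvStep_eq, List.append_assoc]

-- ===== VERDICT (by name: the statement is the Claim_ definition above) =====
theorem find_all_paths_bfs_py_spec : Claim_equal_find_all_paths_bfs_py := by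
  intro graph start end_ max_hops _
  unfold Spec_find_all_paths_bfs_py find_all_paths_bfs_py find_all_paths_bfs_py_alt
  by_cases h : max_hops < 0
  · simp only [h, if_true]
    rw [pvLoopA]
    simp only [List.length_nil, Int.natCast_zero, gt_iff_lt, h, if_true]
    rw [pvLoopA]
  · simp only [h, if_false]
    have := pvMain graph end_ max_hops
      (pvMug graph.length ((graph.map (fun x => x.2.1)).toFinset) [(start, [], PySem.Set.ofList [start])])
      [(start, [], PySem.Set.ofList [start])] [] le_rfl
      (by intro e he; simp at he; subst he; simp; omega)
    simpa using this
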